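-- pv_equiv track=rewrite | github.com/AdamZhouSE/pythonHomework | Code/CodeRecords/2786/60837/276239.py | comSort
-- ===== SOURCE A (Python) =====
-- def comSort(List, result):
--     if len(List)==0:
--         return result
--     newList = []
--     for i in range(len(List)):
--         if List[i] == 1:
--             List[i] = 0
--             for j in range(len(List)):
--                 List[j] -= 1
--                 if List[j] > 0:
--                     newList.append(List[j])
--             result += 1
--             return comSort(newList, result)
--     if len(newList)==0:
--         return result
--     newList[newList.index(min(newList))] = 0
--     for i in range(len(newList)):
--         newList[i] -= 1
--     return comSort(newList, result+1)
-- ===== SOURCE B (Python) =====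
-- def comSort(List, result):
--     # A's answer is result + the largest k with all of 1..k present in the list:
--     # each of A's rounds consumes the value 1 and shifts everything down by one.
--     # (Unlike A, this does not mutate the caller's list; return value is identical.)
--     # k is at most len(List) since 1..k are k distinct values of the list,
--     # so len(List) probe steps always suffice.
--     present = set(List)
--     k = 0
--     for _ in range(len(List)):
--         if k + 1 in present:
--             k += 1
--         else:
--             break
--     return result + k
-- ===== Notes on version B (the rewrite author's own statement) =====
-- stated objective: simpler
-- what changed: Replaces A's recursion (zero the found 1, decrement and rebuild the whole list each round) by a direct count: build a set once and count the longest chain 1..k of values present, returning result + k; B does not mutate the input list.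
import Mathlib
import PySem

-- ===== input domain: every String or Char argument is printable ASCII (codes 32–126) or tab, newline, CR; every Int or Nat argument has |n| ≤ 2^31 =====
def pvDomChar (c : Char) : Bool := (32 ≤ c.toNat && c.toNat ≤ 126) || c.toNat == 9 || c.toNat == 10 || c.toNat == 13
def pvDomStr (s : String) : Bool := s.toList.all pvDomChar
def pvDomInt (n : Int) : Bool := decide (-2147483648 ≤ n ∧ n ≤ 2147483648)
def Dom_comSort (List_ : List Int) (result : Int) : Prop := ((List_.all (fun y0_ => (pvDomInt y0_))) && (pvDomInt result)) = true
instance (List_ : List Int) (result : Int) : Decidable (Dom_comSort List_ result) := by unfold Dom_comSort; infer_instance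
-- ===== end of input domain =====

-- B is a closed-form count (result + longest chain 1..k of values present) instead of A's
-- round-by-round list rebuilding; equivalence is about the RETURN value only: A mutates the
-- caller's list in its first round (zeroes the found 1 and decrements everything), B does not.

-- ===== PORT A =====
-- the scan 'for i in range(len(List)): if List[i] == 1:' — index of the first 1, if any
def scanOne : List Int → Nat → Option Nat
  | [], _ => none
  | x :: xs, i => if x = 1 then some i else scanOne xs (i + 1)

-- facts about the scan, needed by comSort's termination proof
theorem scanOne_some {l : List Int} {s i : Nat} (h : scanOne l s = some i) :
    s ≤ i ∧ i - s < l.length ∧ l[i - s]? = some 1 := by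
  induction l generalizing s with
  | nil => simp [scanOne] at h
  | cons x xs ih =>
    simp only [scanOne] at h
    by_cases hx : x = 1
    · simp [hx] at h
      subst h; simp [hx]
    · simp [hx] at h
      obtain ⟨h1, h2, h3⟩ := ih h
      refine ⟨by omega, by simp; omega, ?_⟩
      have : i - s = (i - (s + 1)) + 1 := by omega
      rw [this]
      simpa using h3

theorem newList_len_lt (L : List Int) (i : Nat) (h : scanOne L 0 = some i) :
    (List.foldl (fun acc x => if x - 1 > 0 then acc ++ [x - 1] else acc) [] (L.set i 0)).length
      < L.length := by
  obtain ⟨-, hlt, -⟩ := scanOne_some h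
  simp only [Nat.sub_zero] at hlt
  rw [PySem.List.foldl_append_ite (p := fun x => x - 1 > 0) (f := fun x => x - 1)]
  simp only [List.nil_append, List.length_map]
  have h0 : (0 : Int) ∈ L.set i 0 := by
    have hi' : i < (L.set i 0).length := by rw [List.length_set]; exact hlt
    exact List.mem_iff_getElem.mpr ⟨i, hi', List.getElem_set_self hi'⟩
  calc ((L.set i 0).filter (fun x => decide (x - 1 > 0))).length
      < (L.set i 0).length := by
        rw [List.length_filter_lt_length_iff_exists]
        exact ⟨0, h0, by decide⟩
    _ = L.length := List.length_set ..

-- A: if a 1 is found at index i, zero it, decrement everything keeping the positives, recurse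
-- with result+1; if no 1 is found the accumulator newList is still [], so 'if len(newList)==0:
-- return result' fires (the code after it is unreachable on every input).
def comSort (List_ : List Int) (result : Int) : Int :=
  if List_.length = 0 then result
  else
    match h : scanOne List_ 0 with
    | some i =>
        let newList := (List_.set i 0).foldl
          (fun acc x => if x - 1 > 0 then acc ++ [x - 1] else acc) []
        comSort newList (result + 1)
    | none => result
termination_by List_.length
decreasing_by exact newList_len_lt List_ i h

-- ===== PORT B =====
-- the 'for _ in range(len(List)): … else: break' loop: at most fuel probe steps, stop at the
-- first k+1 not present
def probe (present : List Int) : Nat → Int → Int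
  | 0, k => k
  | fuel + 1, k => if PySem.Set.contains present (k + 1) then probe present fuel (k + 1) else k

def comSort_alt (List_ : List Int) (result : Int) : Int :=
  let present := PySem.Set.ofList List_
  result + probe present List_.length 0

-- ===== PRECONDITION & SPEC =====
def Spec_comSort (List_ : List Int) (result : Int) (out : Int) : Prop := out = comSort_alt List_ result
instance (List_ : List Int) (result : Int) (out : Int) : Decidable (Spec_comSort List_ result out) := by unfold Spec_comSort; infer_instance

-- ===== CLAIM (what is proved, stated in full; the proofs are below) =====
def Claim_equal_comSort : Prop := ∀ (List_ : List Int) (result : Int), Dom_comSort List_ result → Spec_comSort List_ result (comSort List_ result)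

-- ===== LEMMAS AND PROOFS =====

-- one probe step of B's loop
def stepS (M : List Int) (k : Int) : Int := if (k + 1) ∈ M then k + 1 else k

theorem scanOne_none {l : List Int} {s : Nat} (h : scanOne l s = none) : (1 : Int) ∉ l := by
  induction l generalizing s with
  | nil => simp
  | cons x xs ih =>
    simp only [scanOne] at h
    by_cases hx : x = 1
    · simp [hx] at h
    · simp [hx] at h
      simp [ih h]
      omega

-- the early 'break' does not change the result: stepS is absorbing after the first failure
theorem probe_eq_iterate (L : List Int) :
    ∀ (n : Nat) (k : Int), probe (PySem.Set.ofList L) n k = (stepS L)^[n] k := by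
  intro n
  induction n with
  | zero => intro k; simp [probe]
  | succ n ih =>
    intro k
    by_cases h : (k + 1) ∈ L
    · have hc : PySem.Set.contains (PySem.Set.ofList L) (k + 1) = true := by
        simp [PySem.Set.mem_ofList, h]
      have hs : stepS L k = k + 1 := by simp [stepS, h]
      rw [probe, if_pos hc, ih (k + 1), Function.iterate_succ_apply, hs]
    · have hc : PySem.Set.contains (PySem.Set.ofList L) (k + 1) = false := by
        simp [PySem.Set.mem_ofList, h]
      have hs : stepS L k = k := by simp [stepS, h]
      rw [probe, if_neg (by rw [hc]; simp), Function.iterate_succ_apply, hs]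
      exact (Function.iterate_fixed hs n).symm

theorem alt_eq (L : List Int) (r : Int) :
    comSort_alt L r = r + (stepS L)^[L.length] 0 := by
  unfold comSort_alt
  show r + probe (PySem.Set.ofList L) L.length 0 = _
  rw [probe_eq_iterate]

-- if no 1 is present B's counter never moves
theorem iterate_of_not_one {M : List Int} (h : (1 : Int) ∉ M) (n : Nat) :
    (stepS M)^[n] 0 = 0 := by
  have : stepS M 0 = 0 := by simp [stepS, h]
  exact Function.iterate_fixed this n

-- shift: probing N from k is probing L from k+1, when N holds exactly the j ≥ 1 with j+1 ∈ L
theorem iterate_shift {L N : List Int} (hN : ∀ j : Int, j ∈ N ↔ 1 ≤ j ∧ j + 1 ∈ L) :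
    ∀ (d : Nat) (k : Int), 0 ≤ k → (stepS L)^[d] (k + 1) = 1 + (stepS N)^[d] k := by
  intro d
  induction d with
  | zero => intro k _; simp; ring
  | succ d ih =>
    intro k hk
    rw [Function.iterate_succ_apply, Function.iterate_succ_apply]
    by_cases h : (k + 1 + 1) ∈ L
    · have h1 : stepS L (k + 1) = k + 1 + 1 := by simp [stepS, h]
      have h2 : stepS N k = k + 1 := by
        have hm : (k + 1) ∈ N := (hN (k + 1)).mpr ⟨by omega, h⟩
        simp [stepS, hm]
      rw [h1, h2, ih (k + 1) (by omega)]
    · have h1 : stepS L (k + 1) = k + 1 := by simp [stepS, h]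
      have h2 : stepS N k = k := by
        have hm : (k + 1) ∉ N := fun hc => h ((hN (k + 1)).mp hc).2
        simp [stepS, hm]
      rw [h1, h2, ih k hk]

-- after |M| probe steps the counter is stuck: k+1 more successes would need k+1 distinct values
theorem iterate_stable (M : List Int) :
    ∀ n : Nat, M.length ≤ n → (stepS M)^[n] 0 = (stepS M)^[M.length] 0 := by
  have fix : stepS M ((stepS M)^[M.length] 0) = (stepS M)^[M.length] 0 := by
    by_contra hfix
    set f := stepS M with hf
    set n := M.length with hn
    have claimA : ∀ j : Nat, j ≤ n → f (f^[j] 0) ≠ f^[j] 0 := by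
      intro j hj hstop
      apply hfix
      have : f^[n] 0 = f^[j] 0 := by
        have : f^[n] 0 = f^[n - j] (f^[j] 0) := by
          rw [← Function.iterate_add_apply]
          congr 1
          omega
        rw [this, Function.iterate_fixed hstop]
      rw [this]
      exact hstop
    have claimB : ∀ j : Nat, j ≤ n + 1 → f^[j] 0 = (j : Int) := by
      intro j
      induction j with
      | zero => intro _; simp
      | succ j ih =>
        intro hj
        have hjn : j ≤ n := by omega
        have hv : f^[j] 0 = (j : Int) := ih (by omega)
        rw [Function.iterate_succ_apply', hv]
        have hne : f (j : Int) ≠ (j : Int) := hv ▸ claimA j hjn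
        have : f (j : Int) = (j : Int) + 1 := by
          by_cases h : ((j : Int) + 1) ∈ M
          · simp [hf, stepS, h]
          · exfalso; exact hne (by simp [hf, stepS, h])
        rw [this]; push_cast; ring
    have hmemAll : ∀ j : Nat, j ≤ n → ((j : Int) + 1) ∈ M := by
      intro j hj
      have h1 : f^[j + 1] 0 = ((j : Int) + 1) := by
        have := claimB (j + 1) (by omega); push_cast at this ⊢; omega
      have h2 : f^[j + 1] 0 = f (f^[j] 0) := Function.iterate_succ_apply' f j 0
      have h3 : f^[j] 0 = (j : Int) := claimB j (by omega)
      by_cases h : ((j : Int) + 1) ∈ M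
      · exact h
      · exfalso
        apply claimA j hj
        rw [h3]
        simp [hf, stepS, h]
    -- the n+1 distinct values 1..n+1 all lie in M, |M| = n: pigeonhole
    have hsub : ((List.range (n + 1)).map (fun j : Nat => (j : Int) + 1)) ⊆ M := by
      intro v hv
      simp only [List.mem_map, List.mem_range] at hv
      obtain ⟨j, hj, rfl⟩ := hv
      exact hmemAll j (by omega)
    have hnd : ((List.range (n + 1)).map (fun j : Nat => (j : Int) + 1)).Nodup := by
      refine List.Nodup.map ?_ List.nodup_range
      intro a b hab
      have h' : (a : Int) + 1 = (b : Int) + 1 := hab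
      omega
    have hle := (hnd.subperm hsub).length_le
    rw [List.length_map, List.length_range] at hle
    omega
  intro n hn
  have : n = (n - M.length) + M.length := by omega
  rw [this, Function.iterate_add_apply, Function.iterate_fixed fix]

-- membership in A's rebuilt round list, when L[i] = 1
theorem mem_newList {L : List Int} {i : Nat} (hi : i < L.length) (h1 : L[i] = 1) :
    ∀ j : Int, j ∈ ((L.set i 0).filter (fun x => decide (x - 1 > 0))).map (fun x => x - 1)
      ↔ 1 ≤ j ∧ j + 1 ∈ L := by
  intro j
  constructor
  · intro hj
    simp only [List.mem_map, List.mem_filter, decide_eq_true_eq] at hj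
    obtain ⟨x, ⟨hxm, hxp⟩, rfl⟩ := hj
    refine ⟨by omega, ?_⟩
    have hx2 : x - 1 + 1 = x := by ring
    rw [hx2]
    rcases List.mem_or_eq_of_mem_set hxm with h | h
    · exact h
    · omega
  · rintro ⟨hj1, hj2⟩
    simp only [List.mem_map, List.mem_filter, decide_eq_true_eq]
    refine ⟨j + 1, ⟨?_, by omega⟩, by ring⟩
    obtain ⟨m, hm, hLm⟩ := List.mem_iff_getElem.mp hj2
    have hmi : m ≠ i := by
      intro hc; subst hc; rw [hLm] at h1; omega
    apply List.mem_iff_getElem.mpr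
    exact ⟨m, by simpa using hm, by rw [List.getElem_set_ne (by omega)]; exact hLm⟩

theorem key : ∀ (L : List Int) (r : Int), comSort L r = r + (stepS L)^[L.length] 0 := by
  intro L r
  induction L, r using comSort.induct with
  | case1 L r hlen =>
    obtain rfl := List.length_eq_zero_iff.mp hlen
    rw [comSort]
    simp
  | case2 L r hlen i hscan newList ih =>
    rw [comSort, if_neg hlen]
    have hred : (match h : scanOne L 0 with
        | some i => comSort ((L.set i 0).foldl
            (fun acc x => if x - 1 > 0 then acc ++ [x - 1] else acc) []) (r + 1)
        | none => r) = comSort newList (r + 1) := by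
      split
      · next i' heq =>
        rw [hscan] at heq
        cases heq
        rfl
      · next heq => rw [hscan] at heq; cases heq
    rw [hred, ih]
    obtain ⟨-, hlt, hget⟩ := scanOne_some hscan
    simp only [Nat.sub_zero] at hlt hget
    have h1i : L[i] = 1 := by
      have := List.getElem?_eq_getElem (l := L) (i := i) hlt
      rw [this] at hget
      exact Option.some_injective _ hget
    have hNeq : newList = ((L.set i 0).filter (fun x => decide (x - 1 > 0))).map (fun x => x - 1) := by
      show (L.set i 0).foldl (fun acc x => if x - 1 > 0 then acc ++ [x - 1] else acc) [] = _
      rw [PySem.List.foldl_append_ite (p := fun x => x - 1 > 0) (f := fun x => x - 1)]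
      simp
    have hmem := hNeq ▸ mem_newList hlt h1i
    have hlenN : newList.length < L.length := newList_len_lt L i hscan
    have h1L : (1 : Int) ∈ L := h1i ▸ List.getElem_mem _
    have hpos : 1 ≤ L.length := by omega
    have hsplit : L.length = (L.length - 1) + 1 := by omega
    rw [hsplit, Function.iterate_succ_apply]
    have hstep0 : stepS L 0 = 1 := by simp [stepS, h1L]
    rw [hstep0, show (1 : Int) = 0 + 1 by ring, iterate_shift hmem (L.length - 1) 0 (le_refl 0)]
    rw [iterate_stable newList (L.length - 1) (by omega)]
    ring
  | case3 L r hlen hscan =>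
    rw [comSort, if_neg hlen]
    have hred : (match h : scanOne L 0 with
        | some i => comSort ((L.set i 0).foldl
            (fun acc x => if x - 1 > 0 then acc ++ [x - 1] else acc) []) (r + 1)
        | none => r) = r := by
      split
      · next i' heq => rw [hscan] at heq; cases heq
      · rfl
    rw [hred, iterate_of_not_one (scanOne_none hscan)]
    ring

-- ===== VERDICT (by name: the statement is the Claim_ definition above) =====
theorem comSort_spec : Claim_equal_comSort := by
  intro L r _
  show comSort L r = comSort_alt L r
  rw [key, alt_eq]
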